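-- pv_equiv track=rewrite | github.com/MrBrantCode/unitest_baseline | mut_generate/mist_train_taco/taco_15292/solution.py | min_operations_to_sort_array
-- ===== SOURCE A (Python) =====
-- import math
--
-- def getsqrt(x):
--     s = int(math.sqrt(x))
--     while (s + 1) * (s + 1) <= x:
--         s += 1
--     while s * s > x:
--         s -= 1
--     return s
--
-- def bfs(x):
--     queue = [[x, 0]]
--     reached = set([x])
--     for (u, d) in queue:
--         if u <= 10 ** 9 and u * u not in reached:
--             reached.add(u * u)
--             queue.append([u * u, d + 1])
--         y = getsqrt(u)
--         if y not in reached: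
--             reached.add(y)
--             queue.append([y, d + 1])
--     return sorted(queue)
--
-- def min_operations_to_sort_array(test_cases):
--     results = []
--     for n, a in test_cases:
--         prv = [[1, 0]]
--         for x in a:
--             costs = bfs(x)
--             dp = []
--             (ptr, mn) = (0, 10 ** 18)
--             for (y, d) in costs:
--                 while ptr < len(prv) and prv[ptr][0] <= y:
--                     mn = min(mn, prv[ptr][1])
--                     ptr += 1
--                 dp.append([y, d + mn])
--             prv = dp
--         ans = 10 ** 18
--         for (x, d) in prv:
--             ans = min(ans, d)
--         results.append(ans)
--     return results
-- ===== SOURCE B (Python) =====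
-- import math
--
-- def bfs(x):
--     queue = [[x, 0]]
--     reached = {x}
--     for u, d in queue:
--         if u <= 10 ** 9 and u * u not in reached:
--             reached.add(u * u)
--             queue.append([u * u, d + 1])
--         y = math.isqrt(u)
--         if y not in reached:
--             reached.add(y)
--             queue.append([y, d + 1])
--     return sorted(queue)
--
-- def min_cost_le(prv, y):
--     best = 10 ** 18
--     for v, c in prv:
--         if v <= y:
--             best = min(best, c)
--     return best
--
-- def min_operations_to_sort_array(test_cases):
--     results = []
--     for n, a in test_cases:
--         prv = [(1, 0)]
--         for x in a:
--             prv = [(y, d + min_cost_le(prv, y)) for y, d in bfs(x)]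
--         ans = 10 ** 18
--         for _, d in prv:
--             ans = min(ans, d)
--         results.append(ans)
--     return results
-- ===== Notes on version B (the rewrite author's own statement) =====
-- stated objective: simpler
-- what changed: B drops A's synchronized two-pointer merge between the sorted reachable values and the previous DP layer (pointer+running-min state) and instead computes each new cost by an independent min-over-eligible-previous-costs scan, and replaces A's float math.sqrt plus two correction loops by exact math.isqrt; Pre_ excludes arrays with a negative element, where both A and B raise ValueError in the square root.
import Mathlib
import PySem

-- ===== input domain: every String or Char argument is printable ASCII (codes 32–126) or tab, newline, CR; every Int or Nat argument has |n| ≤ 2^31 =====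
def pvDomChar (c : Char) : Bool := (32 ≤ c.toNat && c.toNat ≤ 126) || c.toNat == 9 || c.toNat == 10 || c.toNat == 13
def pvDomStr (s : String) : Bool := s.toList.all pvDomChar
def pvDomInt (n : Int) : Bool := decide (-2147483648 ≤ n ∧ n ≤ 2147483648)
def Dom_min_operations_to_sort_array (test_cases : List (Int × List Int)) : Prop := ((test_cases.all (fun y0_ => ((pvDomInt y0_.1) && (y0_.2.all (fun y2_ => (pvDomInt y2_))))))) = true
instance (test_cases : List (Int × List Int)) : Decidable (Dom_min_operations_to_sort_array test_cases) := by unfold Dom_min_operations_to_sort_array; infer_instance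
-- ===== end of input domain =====

-- B replaces A's synchronized two-pointer merge over the previous DP layer by a direct
-- min-over-eligible-costs scan per reachable value, and the float-sqrt-plus-correction-loops
-- by math.isqrt: simpler, not faster.


-- ===== PORT A =====
-- getsqrt: `s = int(math.sqrt(x))` is a float estimate; we seed with the exact integer sqrt
-- (for 0 ≤ x any seed in the float's error range gives the same result) and port the two
-- correction loops exactly (fuel-bounded; the loops move by 1, fuel x.toNat+1 is ample).
def pvGetsqrtUp (x : Int) : Nat → Int → Int
  | 0, s => s
  | f+1, s => if (s+1)*(s+1) ≤ x then pvGetsqrtUp x f (s+1) else s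

def pvGetsqrtDown (x : Int) : Nat → Int → Int
  | 0, s => s
  | f+1, s => if s*s > x then pvGetsqrtDown x f (s-1) else s

def getsqrtA (x : Int) : Int :=
  pvGetsqrtDown x (x.toNat+1) (pvGetsqrtUp x (x.toNat+1) ((Nat.sqrt x.toNat : Nat) : Int))

-- `for (u, d) in queue:` with appends to queue = worklist recursion; the returned list is
-- the whole queue in enqueue order.  Fuel 1000 bounds the recursion (the reachable set of
-- any admitted x has far fewer elements; each iteration consumes one pending item).
def pvBfsGoA : Nat → List (Int × Int) → PySem.Set Int → List (Int × Int)
  | 0, _, _ => []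
  | _+1, [], _ => []
  | f+1, (u, d) :: rest, reached =>
      let p1 := if u ≤ 10^9 ∧ ¬ ((u*u) ∈ reached) then (PySem.Set.add reached (u*u), [(u*u, d+1)]) else (reached, ([] : List (Int × Int)))
      let y := getsqrtA u
      let p2 := if ¬ (y ∈ p1.1) then (PySem.Set.add p1.1 y, [(y, d+1)]) else (p1.1, ([] : List (Int × Int)))
      (u, d) :: pvBfsGoA f (rest ++ p1.2 ++ p2.2) p2.1

def bfsA (x : Int) : List (Int × Int) :=
  PySem.List.sorted2 (pvBfsGoA 1000 [(x, 0)] (PySem.Set.ofList [x])) Prod.fst Prod.snd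

-- the inner `while ptr < len(prv) and prv[ptr][0] <= y:` (the guard keeps the index in
-- range, so getD never takes its default; fuel prv.length+1 is ample since ptr only grows)
def pvWhileA (prv : List (Int × Int)) (y : Int) : Nat → Nat → Int → Nat × Int
  | 0, ptr, mn => (ptr, mn)
  | f+1, ptr, mn =>
      if ptr < prv.length ∧ (prv.getD ptr (0, 0)).1 ≤ y
      then pvWhileA prv y f (ptr+1) (min mn (prv.getD ptr (0, 0)).2)
      else (ptr, mn)

def pvLayerA (prv costs : List (Int × Int)) : List (Int × Int) :=
  (costs.foldl (fun (st : Nat × Int × List (Int × Int)) yd =>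
      let r := pvWhileA prv yd.1 (prv.length + 1) st.1 st.2.1
      (r.1, r.2, st.2.2 ++ [(yd.1, yd.2 + r.2)]))
    (0, (10:Int)^18, [])).2.2

def min_operations_to_sort_array (test_cases : List (Int × List Int)) : List Int :=
  test_cases.foldl (fun results c =>
    let prv := c.2.foldl (fun prv x => pvLayerA prv (bfsA x)) [(1, 0)]
    let ans := prv.foldl (fun ans p => min ans p.2) ((10:Int)^18)
    results ++ [ans]) []

-- ===== PORT B =====
def pvBfsGoB : Nat → List (Int × Int) → PySem.Set Int → List (Int × Int)
  | 0, _, _ => []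
  | _+1, [], _ => []
  | f+1, (u, d) :: rest, reached =>
      let p1 := if u ≤ 10^9 ∧ ¬ ((u*u) ∈ reached) then (PySem.Set.add reached (u*u), [(u*u, d+1)]) else (reached, ([] : List (Int × Int)))
      let y := ((Nat.sqrt u.toNat : Nat) : Int)   -- math.isqrt(u), exact for 0 ≤ u (Pre_)
      let p2 := if ¬ (y ∈ p1.1) then (PySem.Set.add p1.1 y, [(y, d+1)]) else (p1.1, ([] : List (Int × Int)))
      (u, d) :: pvBfsGoB f (rest ++ p1.2 ++ p2.2) p2.1

def bfsB (x : Int) : List (Int × Int) :=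
  PySem.List.sorted2 (pvBfsGoB 1000 [(x, 0)] (PySem.Set.ofList [x])) Prod.fst Prod.snd

def pvMinCostLE (prv : List (Int × Int)) (y : Int) : Int :=
  prv.foldl (fun best p => if p.1 ≤ y then min best p.2 else best) ((10:Int)^18)

def min_operations_to_sort_array_alt (test_cases : List (Int × List Int)) : List Int :=
  test_cases.foldl (fun results c =>
    let prv := c.2.foldl (fun prv x => (bfsB x).map (fun yd => (yd.1, yd.2 + pvMinCostLE prv yd.1))) [(1, 0)]
    let ans := prv.foldl (fun ans p => min ans p.2) ((10:Int)^18)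
    results ++ [ans]) []

-- ===== PRECONDITION & SPEC =====
-- Pre_ excludes arrays containing a negative element: there Python A raises ValueError in
-- math.sqrt (and B in math.isqrt); no value is returned by either program.
def Pre_min_operations_to_sort_array (test_cases : List (Int × List Int)) : Prop :=
  ∀ c ∈ test_cases, ∀ x ∈ c.2, 0 ≤ x
instance (test_cases : List (Int × List Int)) : Decidable (Pre_min_operations_to_sort_array test_cases) := by unfold Pre_min_operations_to_sort_array; infer_instance

def pvWitness_min_operations_to_sort_array : (List (Int × List Int)) := [(3, [2, 5, 1]), (2, [16, 4])]

def Spec_min_operations_to_sort_array (test_cases : List (Int × List Int)) (out : List Int) : Prop := out = min_operations_to_sort_array_alt test_cases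
instance (test_cases : List (Int × List Int)) (out : List Int) : Decidable (Spec_min_operations_to_sort_array test_cases out) := by unfold Spec_min_operations_to_sort_array; infer_instance

-- ===== CLAIM (what is proved, stated in full; the proofs are below) =====
def Claim_equal_min_operations_to_sort_array : Prop := ∀ (test_cases : List (Int × List Int)), Dom_min_operations_to_sort_array test_cases → Pre_min_operations_to_sort_array test_cases → Spec_min_operations_to_sort_array test_cases (min_operations_to_sort_array test_cases)

-- ===== LEMMAS AND PROOFS =====

-- A's corrected float sqrt equals B's exact integer sqrt on nonnegative inputs.
theorem getsqrt_eq (x : Int) (hx : 0 ≤ x) : getsqrtA x = ((Nat.sqrt x.toNat : Nat) : Int) := by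
  have hxx : ((x.toNat : Nat) : Int) = x := Int.toNat_of_nonneg hx
  have hs1 : ((Nat.sqrt x.toNat : Nat) : Int) * ((Nat.sqrt x.toNat : Nat) : Int) ≤ ((x.toNat : Nat) : Int) := by
    exact_mod_cast Nat.sqrt_le x.toNat
  have hs2 : ((x.toNat : Nat) : Int) < (((Nat.sqrt x.toNat : Nat) : Int) + 1) * (((Nat.sqrt x.toNat : Nat) : Int) + 1) := by
    have h := Nat.lt_succ_sqrt x.toNat
    rw [Nat.succ_eq_add_one] at h
    exact_mod_cast h
  rw [hxx] at hs1 hs2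
  have h1 : ¬ ((((Nat.sqrt x.toNat : Nat) : Int)+1)*(((Nat.sqrt x.toNat : Nat) : Int)+1) ≤ x) := by omega
  have h2 : ¬ (((Nat.sqrt x.toNat : Nat) : Int)*((Nat.sqrt x.toNat : Nat) : Int) > x) := by omega
  unfold getsqrtA
  simp only [pvGetsqrtUp, if_neg h1, pvGetsqrtDown, if_neg h2]

-- inserting into a list that is nondecreasing w.r.t. a transitive irreflexive `lt`
-- keeps it nondecreasing (Pairwise of "not greater")
theorem pairwise_insertBy {α : Type} (lt : α → α → Bool)
    (htrans : ∀ a b c, lt a b = true → lt b c = true → lt a c = true)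
    (hirrefl : ∀ a, lt a a = false)
    (x : α) (ys : List α) (h : ys.Pairwise (fun a b => lt b a = false)) :
    (PySem.List.insertBy lt x ys).Pairwise (fun a b => lt b a = false) := by
  induction ys with
  | nil => simp [PySem.List.insertBy]
  | cons y ys ih =>
    rw [List.pairwise_cons] at h
    obtain ⟨hy, hys⟩ := h
    by_cases hb : lt x y = true
    · have he : PySem.List.insertBy lt x (y :: ys) = x :: y :: ys := by
        simp [PySem.List.insertBy, hb]
      rw [he]
      refine List.Pairwise.cons ?_ (List.Pairwise.cons hy hys)
      intro z hz
      rcases List.mem_cons.mp hz with rfl | hz'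
      · by_contra hc
        have hzx : lt z x = true := by revert hc; cases hzx : (lt z x) <;> simp
        have := htrans z x z hzx hb
        rw [hirrefl z] at this; exact Bool.false_ne_true this
      · by_contra hc
        have hzx : lt z x = true := by revert hc; cases hzx : (lt z x) <;> simp
        have := htrans z x y hzx hb
        rw [hy z hz'] at this; exact Bool.false_ne_true this
    · have hb' : lt x y = false := by revert hb; cases hbv : (lt x y) <;> simp
      have he : PySem.List.insertBy lt x (y :: ys) = y :: PySem.List.insertBy lt x ys := by
        simp [PySem.List.insertBy, hb']
      rw [he]
      refine List.Pairwise.cons ?_ (ih hys)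
      intro z hz
      rcases (PySem.List.mem_insertBy lt x z ys).mp hz with rfl | hz'
      · exact hb'
      · exact hy z hz'

theorem pairwise_foldl_insertBy {α : Type} (lt : α → α → Bool)
    (htrans : ∀ a b c, lt a b = true → lt b c = true → lt a c = true)
    (hirrefl : ∀ a, lt a a = false) :
    ∀ (xs acc : List α), acc.Pairwise (fun a b => lt b a = false) →
      (xs.foldl (fun acc x => PySem.List.insertBy lt x acc) acc).Pairwise (fun a b => lt b a = false) := by
  intro xs
  induction xs with
  | nil => intro acc h; exact h
  | cons x xs ih =>
    intro acc h
    exact ih _ (pairwise_insertBy lt htrans hirrefl x acc h)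

-- Python's sorted on (value, dist) pairs yields a list nondecreasing in the value
theorem sorted2_pairwise_fst (xs : List (Int × Int)) :
    (PySem.List.sorted2 xs Prod.fst Prod.snd false).Pairwise (fun a b => a.1 ≤ b.1) := by
  have main := pairwise_foldl_insertBy
    (fun a b : Int × Int => decide (a.1 < b.1) || (!decide (b.1 < a.1) && decide (a.2 < b.2)))
    (by intro a b c hab hbc
        simp only [Bool.or_eq_true, Bool.and_eq_true, Bool.not_eq_true', decide_eq_true_eq,
          decide_eq_false_iff_not] at *
        omega)
    (by intro a; simp)
    xs [] (List.Pairwise.nil)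
  have he : PySem.List.sorted2 xs Prod.fst Prod.snd false
      = xs.foldl (fun acc x => PySem.List.insertBy
          (fun a b : Int × Int => decide (a.1 < b.1) || (!decide (b.1 < a.1) && decide (a.2 < b.2))) x acc) [] := by
    simp [PySem.List.sorted2]
  rw [he]
  refine (main.imp ?_)
  intro a b hab
  simp at hab
  omega

-- what the inner while-loop produces: a pointer k past exactly the prefix of prv whose
-- values are ≤ y, and the running min of the costs of that prefix
theorem whileA_spec (prv : List (Int × Int)) (y : Int)
    (hs : prv.Pairwise (fun a b => a.1 ≤ b.1)) :
    ∀ (fuel ptr : Nat) (mn : Int), ptr ≤ prv.length → prv.length - ptr < fuel →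
    (∀ j (_ : j < prv.length), j < ptr → (prv[j]).1 ≤ y) →
    mn = (prv.take ptr).foldl (fun m p => min m p.2) ((10:Int)^18) →
    ∃ k, pvWhileA prv y fuel ptr mn = (k, (prv.take k).foldl (fun m p => min m p.2) ((10:Int)^18))
      ∧ ptr ≤ k ∧ k ≤ prv.length
      ∧ (∀ j (_ : j < prv.length), j < k → (prv[j]).1 ≤ y)
      ∧ (∀ j (_ : j < prv.length), k ≤ j → y < (prv[j]).1) := by
  intro fuel
  induction fuel with
  | zero => intro ptr mn h1 h2 _ _; omega
  | succ f ih =>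
    intro ptr mn h1 h2 hpre hmn
    by_cases hg : ptr < prv.length ∧ (prv.getD ptr (0,0)).1 ≤ y
    · obtain ⟨hp, hle⟩ := hg
      have hgd : prv.getD ptr (0,0) = prv[ptr] := List.getD_eq_getElem prv (0,0) hp
      have hstep : pvWhileA prv y (f+1) ptr mn
          = pvWhileA prv y f (ptr+1) (min mn (prv.getD ptr (0,0)).2) := by
        simp only [pvWhileA]; rw [if_pos ⟨hp, hle⟩]
      rw [hstep]
      have hmn' : min mn (prv.getD ptr (0,0)).2
          = (prv.take (ptr+1)).foldl (fun m p => min m p.2) ((10:Int)^18) := by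
        have ht : prv.take (ptr+1) = prv.take ptr ++ [prv[ptr]] := by
          rw [List.take_add_one, List.getElem?_eq_getElem hp]
          simp
        rw [ht, List.foldl_append, hmn, hgd]
        simp
      obtain ⟨k, he, hk1, hk2, hk3, hk4⟩ :=
        ih (ptr+1) (min mn (prv.getD ptr (0,0)).2) (by omega) (by omega)
          (fun j hj hjp => by
            rcases Nat.lt_succ_iff_lt_or_eq.mp hjp with h | h
            · exact hpre j hj h
            · subst h; rw [← hgd]; exact hle)
          hmn'
      exact ⟨k, he, by omega, hk2, hk3, hk4⟩
    · have hstep : pvWhileA prv y (f+1) ptr mn = (ptr, mn) := by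
        simp only [pvWhileA]; rw [if_neg hg]
      refine ⟨ptr, by rw [hstep, hmn], le_refl _, h1, hpre, ?_⟩
      intro j hj hpj
      have hp : ptr < prv.length := by omega
      have hgd : prv.getD ptr (0,0) = prv[ptr] := List.getD_eq_getElem prv (0,0) hp
      have hyp : y < (prv[ptr]).1 := by
        rcases not_and_or.mp hg with h | h
        · omega
        · rw [hgd] at h; omega
      rcases Nat.lt_or_ge ptr j with h | h
      · have := (List.pairwise_iff_getElem.mp hs) ptr j hp hj h
        omega
      · have : ptr = j := by omega
        subst this; exact hyp

-- on a value-sorted prv the eligible entries (value ≤ y) are exactly the prefix the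
-- pointer has passed
theorem filter_eq_take (y : Int) : ∀ (prv : List (Int × Int)) (k : Nat),
    prv.Pairwise (fun a b => a.1 ≤ b.1) → k ≤ prv.length →
    (∀ j (_ : j < prv.length), j < k → (prv[j]).1 ≤ y) →
    (∀ j (_ : j < prv.length), k ≤ j → y < (prv[j]).1) →
    prv.filter (fun p => decide (p.1 ≤ y)) = prv.take k := by
  intro prv
  induction prv with
  | nil => simp
  | cons p rest ih =>
    intro k hs hk hlo hhi
    rw [List.pairwise_cons] at hs
    match k with
    | 0 =>
      have h0 : y < p.1 := by simpa using hhi 0 (by simp) (by omega)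
      simp only [List.take_zero]
      rw [List.filter_cons_of_neg (by simp; omega)]
      rw [ih 0 hs.2 (by omega) (fun j hj hj0 => by omega)
          (fun j hj _ => by simpa using hhi (j+1) (by simpa using hj) (by omega))]
      simp
    | k'+1 =>
      have hp : p.1 ≤ y := by simpa using hlo 0 (by simp) (by omega)
      rw [List.filter_cons_of_pos (by simpa using hp)]
      simp only [List.take_succ_cons]
      congr 1
      exact ih k' hs.2 (by simpa using hk)
        (fun j hj hjk => by simpa using hlo (j+1) (by simpa using hj) (by omega))
        (fun j hj hjk => by simpa using hhi (j+1) (by simpa using hj) (by omega))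

theorem minCostLE_eq (prv : List (Int × Int)) (y : Int) :
    pvMinCostLE prv y
      = (prv.filter (fun p => decide (p.1 ≤ y))).foldl (fun m p => min m p.2) ((10:Int)^18) := by
  rw [List.foldl_filter]
  simp [pvMinCostLE]

theorem layerA_aux (prv : List (Int × Int)) (hs : prv.Pairwise (fun a b => a.1 ≤ b.1)) :
    ∀ (costs : List (Int × Int)) (ptr : Nat) (mn : Int) (dp : List (Int × Int)),
    costs.Pairwise (fun a b => a.1 ≤ b.1) → ptr ≤ prv.length →
    (∀ j (_ : j < prv.length), j < ptr → ∀ c ∈ costs, (prv[j]).1 ≤ c.1) →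
    mn = (prv.take ptr).foldl (fun m p => min m p.2) ((10:Int)^18) →
    (costs.foldl (fun (st : Nat × Int × List (Int × Int)) yd =>
        let r := pvWhileA prv yd.1 (prv.length + 1) st.1 st.2.1
        (r.1, r.2, st.2.2 ++ [(yd.1, yd.2 + r.2)])) (ptr, mn, dp)).2.2
      = dp ++ costs.map (fun yd => (yd.1, yd.2 + pvMinCostLE prv yd.1)) := by
  intro costs
  induction costs with
  | nil => intro ptr mn dp _ _ _ _; simp
  | cons c cs ih =>
    intro ptr mn dp hc hptr hpre hmn
    rw [List.pairwise_cons] at hc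
    obtain ⟨hcc, hcs⟩ := hc
    obtain ⟨k, heq, hik, hkl, hlo, hhi⟩ :=
      whileA_spec prv c.1 hs (prv.length+1) ptr mn hptr (by omega)
        (fun j hj hjp => hpre j hj hjp c (by simp)) hmn
    have hmc : pvMinCostLE prv c.1 = (prv.take k).foldl (fun m p => min m p.2) ((10:Int)^18) := by
      rw [minCostLE_eq, filter_eq_take c.1 prv k hs hkl hlo hhi]
    simp only [List.foldl_cons, heq]
    rw [ih k _ (dp ++ [(c.1, c.2 + (prv.take k).foldl (fun m p => min m p.2) ((10:Int)^18))]) hcs hkl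
        (fun j hj hjk c' hc' => le_trans (hlo j hj hjk) (hcc c' hc'))
        rfl]
    simp [hmc]

-- the whole two-pointer merge equals B's per-value min over eligible previous costs
theorem layerA_eq (prv costs : List (Int × Int))
    (hs : prv.Pairwise (fun a b => a.1 ≤ b.1))
    (hc : costs.Pairwise (fun a b => a.1 ≤ b.1)) :
    pvLayerA prv costs = costs.map (fun yd => (yd.1, yd.2 + pvMinCostLE prv yd.1)) := by
  unfold pvLayerA
  rw [layerA_aux prv hs costs 0 ((10:Int)^18) [] hc (by omega)
      (fun j hj hjp => by omega) (by simp)]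
  simp

theorem bfsGo_eq : ∀ (f : Nat) (pending : List (Int × Int)) (reached : PySem.Set Int),
    (∀ p ∈ pending, 0 ≤ p.1) → pvBfsGoA f pending reached = pvBfsGoB f pending reached := by
  intro f
  induction f with
  | zero => intro pending reached _; rfl
  | succ f ih =>
    intro pending reached h
    match pending with
    | [] => rfl
    | (u, d) :: rest =>
      have hu : 0 ≤ u := h (u, d) (by simp)
      have hg : getsqrtA u = ((Nat.sqrt u.toNat : Nat) : Int) := getsqrt_eq u hu
      simp only [pvBfsGoA, pvBfsGoB, hg]
      congr 1
      apply ih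
      intro p hp
      by_cases hc1 : u ≤ 10 ^ 9 ∧ ¬((u*u) ∈ reached)
      · rw [if_pos hc1] at hp
        by_cases hc2 : ¬(((Nat.sqrt u.toNat : Nat) : Int) ∈ (PySem.Set.add reached (u*u), [(u*u, d+1)]).1)
        · rw [if_pos hc2] at hp
          simp only [List.mem_append, List.mem_singleton] at hp
          rcases hp with (hr | rfl) | rfl
          · exact h p (List.mem_cons_of_mem _ hr)
          · exact mul_self_nonneg u
          · exact Int.natCast_nonneg _
        · rw [if_neg hc2] at hp
          simp only [List.mem_append, List.mem_singleton, List.not_mem_nil, or_false] at hp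
          rcases hp with hr | rfl
          · exact h p (List.mem_cons_of_mem _ hr)
          · exact mul_self_nonneg u
      · rw [if_neg hc1] at hp
        by_cases hc2 : ¬(((Nat.sqrt u.toNat : Nat) : Int) ∈ (reached, ([] : List (Int × Int))).1)
        · rw [if_pos hc2] at hp
          simp only [List.mem_append, List.mem_singleton, List.not_mem_nil, or_false] at hp
          rcases hp with hr | rfl
          · exact h p (List.mem_cons_of_mem _ hr)
          · exact Int.natCast_nonneg _
        · rw [if_neg hc2] at hp
          simp only [List.append_nil] at hp
          exact h p (List.mem_cons_of_mem _ hp)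

theorem bfs_eq (x : Int) (hx : 0 ≤ x) : bfsA x = bfsB x := by
  unfold bfsA bfsB
  rw [bfsGo_eq 1000 [(x, 0)] (PySem.Set.ofList [x]) (by simpa using hx)]

theorem fold_eq : ∀ (a : List Int) (prv : List (Int × Int)), (∀ x ∈ a, 0 ≤ x) →
    prv.Pairwise (fun p q => p.1 ≤ q.1) →
    a.foldl (fun prv x => pvLayerA prv (bfsA x)) prv
      = a.foldl (fun prv x => (bfsB x).map (fun yd => (yd.1, yd.2 + pvMinCostLE prv yd.1))) prv := by
  intro a
  induction a with
  | nil => intros; rfl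
  | cons x xs ih =>
    intro prv h hp
    have hx : 0 ≤ x := h x (by simp)
    have hcost : (bfsB x).Pairwise (fun p q => p.1 ≤ q.1) := sorted2_pairwise_fst _
    simp only [List.foldl_cons]
    rw [bfs_eq x hx, layerA_eq prv (bfsB x) hp hcost]
    exact ih _ (fun y hy => h y (by simp [hy]))
      (List.Pairwise.map _ (fun a b hab => hab) hcost)

theorem main_eq (test_cases : List (Int × List Int))
    (hpre : Pre_min_operations_to_sort_array test_cases) :
    min_operations_to_sort_array test_cases = min_operations_to_sort_array_alt test_cases := by
  unfold min_operations_to_sort_array min_operations_to_sort_array_alt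
  rw [PySem.List.foldl_append_singleton_eq_map, PySem.List.foldl_append_singleton_eq_map]
  simp only [List.nil_append]
  apply List.map_congr_left
  intro c hc
  rw [fold_eq c.2 [(1, 0)] (hpre c hc) (by simp)]

-- ===== VERDICT (by name: the statement is the Claim_ definition above) =====
theorem min_operations_to_sort_array_spec : Claim_equal_min_operations_to_sort_array := by
  intro test_cases _ hpre
  unfold Spec_min_operations_to_sort_array
  exact main_eq test_cases hpre
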